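-- pv_equiv track=rewrite | github.com/xiaohuanlin/Algorithms | Leetcode/2319. Check if Matrix Is X-Matrix.py | checkXMatrix
-- ===== SOURCE A (Python) =====
-- from typing import List
--
-- def checkXMatrix(grid: List[List[int]]) -> bool:
--     n = len(grid)
--     for x in range(n):
--         for y in range(n):
--             if x == y or x + y == n - 1:
--                 if grid[x][y] == 0:
--                     return False
--             else:
--                 if grid[x][y] != 0:
--                     return False
--     return True
-- ===== SOURCE B (Python) =====
-- from typing import List
--
-- def checkXMatrix(grid: List[List[int]]) -> bool:
--     n = len(grid)
--     if any(len(row) != n for row in grid):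
--         return False
--     expected = 0 if n == 0 else 2 * n - n % 2
--     diag_ok = all(row[y] != 0
--                   for x, row in enumerate(grid)
--                   for y in range(n) if x == y or x + y == n - 1)
--     nonzero = sum(1 for row in grid for y in range(n) if row[y] != 0)
--     return diag_ok and nonzero == expected
-- ===== Notes on version B (the rewrite author's own statement) =====
-- stated objective: alternative
-- what changed: Replaced A's per-cell early-return nested scan by a squareness check plus a count-and-compare strategy: B verifies every diagonal/anti-diagonal cell is nonzero and that the total number of nonzero cells equals the closed-form diagonal-cell count 2n - n%2, which forces all off-diagonal cells to be zero.
-- outside the precondition, e.g. on checkXMatrix([[1, 5]]): A returns True, B returns False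
import Mathlib
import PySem

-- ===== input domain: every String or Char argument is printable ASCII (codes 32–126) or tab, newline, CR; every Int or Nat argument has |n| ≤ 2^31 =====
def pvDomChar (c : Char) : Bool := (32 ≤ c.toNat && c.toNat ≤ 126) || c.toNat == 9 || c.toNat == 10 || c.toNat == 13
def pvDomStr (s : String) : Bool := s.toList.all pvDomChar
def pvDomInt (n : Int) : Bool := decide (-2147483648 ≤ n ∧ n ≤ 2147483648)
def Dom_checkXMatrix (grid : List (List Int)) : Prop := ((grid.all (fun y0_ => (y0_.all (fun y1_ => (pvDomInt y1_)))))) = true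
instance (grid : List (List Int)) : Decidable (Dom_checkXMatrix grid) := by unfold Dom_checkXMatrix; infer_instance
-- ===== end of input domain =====

-- B replaces A's per-cell early-return scan by a count-and-compare pass (diagonal cells all
-- nonzero, and the total nonzero count equals the closed-form diagonal-cell count 2n - n%2);
-- same O(n^2) cost, a genuinely different decomposition ("alternative", not faster).

-- ===== PORT A =====
-- literal transliteration of A's nested for-loops with early 'return False':
-- the loop returns False at the first offending cell, i.e. it is the conjunction
-- of the per-cell conditions, in the same order.
def checkXMatrix (grid : List (List Int)) : Bool :=
  let n : Int := PySem.List.len grid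
  (PySem.List.pyRange 0 n 1).all (fun x =>
    (PySem.List.pyRange 0 n 1).all (fun y =>
      if x == y || x + y == n - 1 then
        !(PySem.List.pyGetD (PySem.List.pyGetD grid x []) y 0 == 0)
      else
        !(PySem.List.pyGetD (PySem.List.pyGetD grid x []) y 0 != 0)))

-- ===== PORT B =====
-- literal transliteration of Source B: expected count, the diag_ok all-comprehension
-- (a filtered generator), and the nonzero sum-comprehension (summed row by row).
def checkXMatrix_alt (grid : List (List Int)) : Bool :=
  let n : Int := PySem.List.len grid
  if grid.any (fun row => PySem.List.len row != n) then false else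
  let expected : Int := if n == 0 then 0 else 2 * n - PySem.Int.mod n 2
  let diagOk : Bool := (PySem.List.enumerate grid 0).all (fun xr =>
    ((PySem.List.pyRange 0 n 1).filter (fun y => xr.1 == y || xr.1 + y == n - 1)).all
      (fun y => PySem.List.pyGetD xr.2 y 0 != 0))
  let nonzero : Int := grid.foldl (fun c row =>
    c + ((PySem.List.pyRange 0 n 1).filter (fun y => PySem.List.pyGetD row y 0 != 0)).length) 0
  diagOk && nonzero == expected

-- ===== PRECONDITION & SPEC =====
-- cell value grid[x][y] as the ports read it (getD with defaults)
def pvG (grid : List (List Int)) (x y : Nat) : Int := (grid.getD x []).getD y 0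
-- (x,y) lies on the diagonal or anti-diagonal of an n×n matrix
def pvDiag (n x y : Nat) : Bool := x == y || x + y + 1 == n
-- some in-bounds cell violates the X-matrix condition and every earlier row is full
-- length, i.e. A's row-major scan reaches a violation before any IndexError
def pvViol (grid : List (List Int)) : Prop :=
  ∃ x < grid.length, (∀ x' < x, grid.length ≤ (grid.getD x' []).length) ∧
    ∃ y < grid.length, y < (grid.getD x []).length ∧
      ((pvDiag grid.length x y = true ∧ pvG grid x y = 0) ∨
       (pvDiag grid.length x y = false ∧ pvG grid x y ≠ 0))

-- Pre_ holds iff the grid is square (the function's natural domain), or A's scan hits a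
-- violated cell before any missing one (A returns False; B also returns False).  It
-- excludes (a) grids where Python A raises IndexError, and (b) non-square grids whose
-- rows all have length > len(grid) and whose first len(grid) columns form an X-matrix:
-- there A silently ignores the extra columns and returns True (an accidental corner no
-- caller relies on), while B's squareness check returns False.
def Pre_checkXMatrix (grid : List (List Int)) : Prop :=
  (∀ row ∈ grid, row.length = grid.length) ∨ pvViol grid
instance (grid : List (List Int)) : Decidable (Pre_checkXMatrix grid) := by
  unfold Pre_checkXMatrix pvViol; infer_instance
def pvWitness_checkXMatrix : List (List Int) := [[1, 0, 2], [0, 3, 0], [4, 0, 5]]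

def Spec_checkXMatrix (grid : List (List Int)) (out : Bool) : Prop := out = checkXMatrix_alt grid
instance (grid : List (List Int)) (out : Bool) : Decidable (Spec_checkXMatrix grid out) := by
  unfold Spec_checkXMatrix; infer_instance

-- ===== CLAIM (what is proved, stated in full; the proofs are below) =====
def Claim_equal_checkXMatrix : Prop := ∀ (grid : List (List Int)), Dom_checkXMatrix grid → Pre_checkXMatrix grid → Spec_checkXMatrix grid (checkXMatrix grid)

-- ===== LEMMAS AND PROOFS =====

lemma pv_cond_iff (n x y : Nat) :
    ((((x : Int) == (y : Int)) || ((x : Int) + (y : Int) == (n : Int) - 1)) = true) ↔ pvDiag n x y = true := by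
  simp only [Bool.or_eq_true, beq_iff_eq, pvDiag]
  omega

-- countP over List.range as a Finset card
lemma pv_countP_range (p : Nat → Bool) (n : Nat) :
    (List.range n).countP p = ((Finset.range n).filter (fun y => p y)).card := by
  rw [List.countP_eq_length_filter, Finset.card_filter]
  induction n with
  | zero => simp
  | succ m ih =>
      rw [List.range_succ, Finset.sum_range_succ, List.filter_append, List.length_append, ih]
      cases h : p m <;> simp [List.filter, h]

-- sum of a mapped list as a sum over indices
lemma pv_sum_map_getD (l : List (List Int)) (f : List Int → Int) :
    (l.map f).sum = ∑ i ∈ Finset.range l.length, f (l.getD i []) := by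
  induction l using List.reverseRecOn with
  | nil => simp
  | append_singleton xs x ih =>
      rw [List.map_append, List.sum_append, ih, List.length_append, List.length_singleton,
        Finset.sum_range_succ]
      congr 1
      · exact Finset.sum_congr rfl fun i hi => by
          rw [List.getD_append _ _ _ _ (Finset.mem_range.mp hi)]
      · simp [List.getD_eq_getElem?_getD]

-- the diagonal cells of row x are exactly {x, n-1-x}
lemma pv_diag_filter (n x : Nat) (hx : x < n) :
    (Finset.range n).filter (fun y => pvDiag n x y = true) = insert x {n - 1 - x} := by
  ext y
  simp only [Finset.mem_filter, Finset.mem_range, pvDiag, Bool.or_eq_true, beq_iff_eq,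
    Finset.mem_insert, Finset.mem_singleton]
  omega

-- how many x < n solve 2x+1 = n : n % 2
lemma pv_center_count (n : Nat) :
    ((Finset.range n).filter (fun x => 2 * x + 1 = n)).card = n % 2 := by
  rcases Nat.even_or_odd n with ⟨k, hk⟩ | ⟨k, hk⟩
  · have : (Finset.range n).filter (fun x => 2 * x + 1 = n) = ∅ := by
      ext x; simp only [Finset.mem_filter, Finset.mem_range, Finset.notMem_empty, iff_false]
      omega
    rw [this]; simp; omega
  · have : (Finset.range n).filter (fun x => 2 * x + 1 = n) = {k} := by
      ext x; simp only [Finset.mem_filter, Finset.mem_range, Finset.mem_singleton]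
      omega
    rw [this]; simp; omega

-- total number of diagonal/anti-diagonal cells: 2n - n%2
lemma pv_diag_count (n : Nat) :
    (∑ x ∈ Finset.range n, ((Finset.range n).filter (fun y => pvDiag n x y = true)).card)
      = 2 * n - n % 2 := by
  have hstep : ∀ x ∈ Finset.range n,
      ((Finset.range n).filter (fun y => pvDiag n x y = true)).card
        = if 2 * x + 1 = n then 1 else 2 := by
    intro x hx
    rw [pv_diag_filter n x (Finset.mem_range.mp hx)]
    by_cases h : 2 * x + 1 = n
    · have : x = n - 1 - x := by omega
      rw [if_pos h, ← this]; simp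
    · have hne : x ≠ n - 1 - x := by have := Finset.mem_range.mp hx; omega
      rw [if_neg h, Finset.card_insert_of_notMem (by simpa using hne)]; simp
  rw [Finset.sum_congr rfl hstep, Finset.sum_ite, Finset.sum_const, Finset.sum_const,
    pv_center_count]
  have h := Finset.card_filter_add_card_filter_not (s := Finset.range n)
    (p := fun x => 2 * x + 1 = n)
  rw [Finset.card_range, pv_center_count] at h
  simp only [smul_eq_mul]
  omega

-- characterisation of port A
lemma pv_A_iff (grid : List (List Int)) :
    checkXMatrix grid = true ↔
      ∀ x < grid.length, ∀ y < grid.length,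
        (pvDiag grid.length x y = true → pvG grid x y ≠ 0) ∧
        (¬ pvDiag grid.length x y = true → pvG grid x y = 0) := by
  unfold checkXMatrix
  simp only [PySem.List.len_eq, PySem.List.pyRange_zero_nat, List.all_map, List.all_eq_true,
    List.mem_range, Function.comp, PySem.List.pyGetD_natCast]
  refine forall₂_congr fun x hx => forall₂_congr fun y hy => ?_
  by_cases hd : pvDiag grid.length x y = true
  · rw [if_pos ((pv_cond_iff grid.length x y).mpr hd)]
    simp [pvG, hd]
  · rw [if_neg (fun hc => hd ((pv_cond_iff grid.length x y).mp hc))]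
    simp [pvG, hd]

-- characterisation of port B on square grids
lemma pv_B_iff (grid : List (List Int)) (hsq : ∀ row ∈ grid, row.length = grid.length) :
    checkXMatrix_alt grid = true ↔
      ((∀ x < grid.length, ∀ y < grid.length, pvDiag grid.length x y = true → pvG grid x y ≠ 0) ∧
       (∑ x ∈ Finset.range grid.length,
          ((Finset.range grid.length).filter (fun y => pvG grid x y ≠ 0)).card)
         = 2 * grid.length - grid.length % 2) := by
  unfold checkXMatrix_alt
  simp only [PySem.List.len_eq, beq_iff_eq]
  rw [if_neg (by
    simp only [List.any_eq_true, bne_iff_ne, ne_eq, not_exists, not_and, not_not]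
    exact fun row hr => by exact_mod_cast hsq row hr)]
  simp only [Bool.and_eq_true, beq_iff_eq]
  apply and_congr
  · simp only [PySem.List.mem_enumerate_iff, List.all_eq_true, PySem.List.pyRange_zero_nat,
      List.filter_map, List.all_map, List.mem_filter, List.mem_range, Function.comp,
      PySem.List.pyGetD_natCast, zero_add, bne_iff_ne, ne_eq,
      forall_exists_index]
    constructor
    · intro h x hx y hy hd
      have hg := h (↑x, grid[x]) x hx rfl y ⟨hy, (pv_cond_iff grid.length x y).mpr hd⟩
      simpa [pvG, List.getD_eq_getElem?_getD, List.getElem?_eq_getElem hx] using hg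
    · rintro h p k hk rfl j ⟨hj, hcond⟩
      have hg := h k hk j hj ((pv_cond_iff grid.length k j).mp hcond)
      simpa [pvG, List.getD_eq_getElem?_getD, List.getElem?_eq_getElem hk] using hg
  · rw [PySem.List.foldl_add grid (fun row =>
      ((List.filter (fun y => PySem.List.pyGetD row y 0 != 0)
        (PySem.List.pyRange 0 (grid.length : Int))).length : Int)) 0]
    simp only [PySem.List.pyRange_zero_nat, List.filter_map, List.length_map,
      Function.comp_def, PySem.List.pyGetD_natCast, zero_add]
    rw [pv_sum_map_getD]
    have hrow : ∀ (row : List Int),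
        (List.filter (fun k => row.getD k 0 != 0) (List.range grid.length)).length
          = ((Finset.range grid.length).filter (fun y => row.getD y 0 ≠ 0)).card := by
      intro row
      rw [← List.countP_eq_length_filter, pv_countP_range]
      congr 1
      exact Finset.filter_congr fun y _ => by simp
    have hexp : (if (grid.length : Int) = 0 then 0
          else 2 * (grid.length : Int) - PySem.Int.mod (grid.length : Int) 2)
        = ((2 * grid.length - grid.length % 2 : Nat) : Int) := by
      by_cases h0 : grid.length = 0
      · simp [h0]
      · rw [if_neg (by exact_mod_cast h0), PySem.Int.mod_eq_emod_of_pos (by norm_num : (0:Int) < 2)]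
        omega
    rw [hexp]
    simp only [hrow]
    rw [show (∑ i ∈ Finset.range grid.length,
          ((((Finset.range grid.length).filter (fun y => (grid.getD i []).getD y 0 ≠ 0)).card : Nat) : Int))
        = ((∑ i ∈ Finset.range grid.length,
            ((Finset.range grid.length).filter (fun y => (grid.getD i []).getD y 0 ≠ 0)).card : Nat) : Int)
      from (Nat.cast_sum _ _).symm, Nat.cast_inj]
    simp [pvG]

-- the combinatorial heart: per-cell description ⟷ count-and-compare description
lemma pv_core (grid : List (List Int)) :
    (∀ x < grid.length, ∀ y < grid.length,
        (pvDiag grid.length x y = true → pvG grid x y ≠ 0) ∧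
        (¬ pvDiag grid.length x y = true → pvG grid x y = 0)) ↔
      ((∀ x < grid.length, ∀ y < grid.length, pvDiag grid.length x y = true → pvG grid x y ≠ 0) ∧
       (∑ x ∈ Finset.range grid.length,
          ((Finset.range grid.length).filter (fun y => pvG grid x y ≠ 0)).card)
         = 2 * grid.length - grid.length % 2) := by
  constructor
  · intro h
    refine ⟨fun x hx y hy hd => (h x hx y hy).1 hd, ?_⟩
    have hfe : ∀ x ∈ Finset.range grid.length,
        (Finset.range grid.length).filter (fun y => pvG grid x y ≠ 0)
          = (Finset.range grid.length).filter (fun y => pvDiag grid.length x y = true) := by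
      intro x hx
      refine Finset.filter_congr fun y hy => ?_
      have hx' := Finset.mem_range.mp hx
      have hy' := Finset.mem_range.mp hy
      constructor
      · intro hnz
        by_contra hnd
        exact hnz ((h x hx' y hy').2 hnd)
      · intro hd
        exact (h x hx' y hy').1 hd
    rw [Finset.sum_congr rfl (fun x hx => by rw [hfe x hx]), pv_diag_count]
  · rintro ⟨hdiag, hsum⟩ x hx y hy
    refine ⟨hdiag x hx y hy, fun hnd => ?_⟩
    by_contra hnz
    have hsub : ∀ z ∈ Finset.range grid.length,
        (Finset.range grid.length).filter (fun y => pvDiag grid.length z y = true) ⊆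
        (Finset.range grid.length).filter (fun y => pvG grid z y ≠ 0) := by
      intro z hz w hw
      rw [Finset.mem_filter] at hw ⊢
      exact ⟨hw.1, hdiag z (Finset.mem_range.mp hz) w (Finset.mem_range.mp hw.1) hw.2⟩
    have hle : ∀ z ∈ Finset.range grid.length,
        ((Finset.range grid.length).filter (fun y => pvDiag grid.length z y = true)).card ≤
        ((Finset.range grid.length).filter (fun y => pvG grid z y ≠ 0)).card :=
      fun z hz => Finset.card_le_card (hsub z hz)
    have hall := (Finset.sum_eq_sum_iff_of_le hle).mp
      (by rw [pv_diag_count, hsum])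
    have hxmem : x ∈ Finset.range grid.length := Finset.mem_range.mpr hx
    have heq : (Finset.range grid.length).filter (fun y => pvDiag grid.length x y = true) =
        (Finset.range grid.length).filter (fun y => pvG grid x y ≠ 0) :=
      Finset.eq_of_subset_of_card_le (hsub x hxmem) (le_of_eq (hall x hxmem).symm)
    have hymem : y ∈ (Finset.range grid.length).filter (fun y => pvG grid x y ≠ 0) :=
      Finset.mem_filter.mpr ⟨Finset.mem_range.mpr hy, hnz⟩
    rw [← heq, Finset.mem_filter] at hymem
    exact hnd hymem.2

lemma pv_eq (grid : List (List Int)) (hpre : Pre_checkXMatrix grid) :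
    checkXMatrix grid = checkXMatrix_alt grid := by
  by_cases hsq : ∀ row ∈ grid, row.length = grid.length
  · have h := (pv_A_iff grid).trans ((pv_core grid).trans (pv_B_iff grid hsq).symm)
    cases hA : checkXMatrix grid <;> cases hB : checkXMatrix_alt grid <;> simp_all
  · have hB : checkXMatrix_alt grid = false := by
      unfold checkXMatrix_alt
      simp only [PySem.List.len_eq]
      rw [if_pos]
      simp only [List.any_eq_true, bne_iff_ne, ne_eq]
      push Not at hsq
      obtain ⟨row, hr, hne⟩ := hsq
      exact ⟨row, hr, by exact_mod_cast hne⟩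
    have hviol : pvViol grid := hpre.resolve_left hsq
    have hA : checkXMatrix grid = false := by
      cases hAc : checkXMatrix grid
      · rfl
      · exfalso
        have h := (pv_A_iff grid).mp hAc
        obtain ⟨x, hx, hprior, y, hy, hylen, hbad⟩ := hviol
        rcases hbad with ⟨hd, h0⟩ | ⟨hd, h0⟩
        · exact (h x hx y hy).1 hd h0
        · exact h0 ((h x hx y hy).2 (by simp [hd]))
    rw [hA, hB]

-- ===== VERDICT (by name: the statement is the Claim_ definition above) =====
theorem checkXMatrix_spec : Claim_equal_checkXMatrix := by
  intro grid _ hpre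
  unfold Spec_checkXMatrix
  exact pv_eq grid hpre
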